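-- pv_equiv track=rewrite | github.com/srinathdivate123/SWDC-Website | action/views.py | Format_Name_Function
-- ===== SOURCE A (Python) =====
-- def Format_Name_Function(name):
--     name = name.strip()
--     if name == 'AnonymousUser' or len(name) < 3:
--         return ''
--     formatted_name = name[0].upper()
--     i = 1
--     while i < len(name):
--         if name[i] == ' ':
--             if name[i + 1] == ' ':
--                 i += 1
--                 continue
--             formatted_name += ' ' + name[i + 1].upper()
--             i += 1
--         else:
--             formatted_name += name[i].lower()
--         i += 1
--     return formatted_name
-- ===== SOURCE B (Python) =====
-- def Format_Name_Function(name):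
--     name = name.strip()
--     if name == 'AnonymousUser' or len(name) < 3:
--         return ''
--     words = [w for w in name.split(' ') if w]
--     return ' '.join(w[0].upper() + w[1:].lower() for w in words)
-- ===== Notes on version B (the rewrite author's own statement) =====
-- stated objective: faster
-- what changed: Replaced the index-walking state machine (manual index, continue, lookahead) by tokenize-then-map: split on the space character, drop empty tokens, capitalize each word as first-char-upper plus rest-lower, join with single spaces.
import Mathlib
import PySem

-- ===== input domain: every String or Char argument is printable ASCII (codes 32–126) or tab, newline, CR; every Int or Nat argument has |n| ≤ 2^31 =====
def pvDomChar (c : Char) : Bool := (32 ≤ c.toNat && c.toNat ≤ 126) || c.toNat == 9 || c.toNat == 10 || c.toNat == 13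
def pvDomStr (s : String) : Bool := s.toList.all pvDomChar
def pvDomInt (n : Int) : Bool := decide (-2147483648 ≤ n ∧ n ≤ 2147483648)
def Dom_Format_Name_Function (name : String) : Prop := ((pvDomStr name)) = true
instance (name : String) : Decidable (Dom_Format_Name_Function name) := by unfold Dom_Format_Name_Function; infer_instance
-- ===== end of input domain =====

-- B replaces A's index-walking state machine by split-on-space / capitalize each word / join (measured faster: A concatenates strings in a loop).

-- ===== PORT A =====
-- A's while loop over index i, ported as the obvious structural recursion on the remaining
-- characters; the accumulator is A's formatted_name.
def fnfLoopA (acc : List Char) : List Char → List Char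
  | [] => acc
  | c :: r =>
    if c = ' ' then
      match r with
      | [] => acc      -- Python reads name[i+1] here; unreachable: a stripped string never ends in ' '
      | d :: r' =>
        if d = ' ' then fnfLoopA acc (d :: r')
        else fnfLoopA (acc ++ [' ', PySem.Chars.upperChar d]) r'
    else fnfLoopA (acc ++ [PySem.Chars.lowerChar c]) r
  termination_by l => l.length
  decreasing_by all_goals (simp; try omega)

def Format_Name_Function (name : String) : String :=
  let l := PySem.Chars.strip name.toList
  if l = "AnonymousUser".toList ∨ l.length < 3 then ""
  else
    match l with
    | [] => ""         -- unreachable: l.length ≥ 3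
    | c :: r => String.ofList (fnfLoopA [PySem.Chars.upperChar c] r)

-- ===== PORT B =====
-- w[0].upper() + w[1:].lower()
def fnfCap : List Char → List Char
  | [] => []
  | c :: r => PySem.Chars.upperChar c :: PySem.Chars.lower r

def Format_Name_Function_alt (name : String) : String :=
  let l := PySem.Chars.strip name.toList
  if l = "AnonymousUser".toList ∨ l.length < 3 then ""
  else
    let words := (PySem.Chars.splitOn l [' ']).filter (· ≠ [])
    String.ofList (PySem.Chars.join [' '] (words.map fnfCap))

-- ===== PRECONDITION & SPEC =====
def Spec_Format_Name_Function (name : String) (out : String) : Prop := out = Format_Name_Function_alt name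
instance (name : String) (out : String) : Decidable (Spec_Format_Name_Function name out) := by unfold Spec_Format_Name_Function; infer_instance

-- ===== CLAIM (what is proved, stated in full; the proofs are below) =====
def Claim_equal_Format_Name_Function : Prop := ∀ (name : String), Dom_Format_Name_Function name → Spec_Format_Name_Function name (Format_Name_Function name)

-- ===== LEMMAS AND PROOFS =====

-- split on ' ' as a plain structural recursion (pre = reversed-free current piece)
def fnfSplit (pre : List Char) : List Char → List (List Char)
  | [] => [pre]
  | c :: r => if c = ' ' then pre :: fnfSplit [] r else fnfSplit (pre ++ [c]) r

-- the nonempty tokens of l, each with its following-rest structure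
def fnfToks : List Char → List (List Char)
  | [] => []
  | c :: r =>
    if c = ' ' then fnfToks r
    else (c :: r.takeWhile (· ≠ ' ')) :: fnfToks (r.dropWhile (· ≠ ' '))
  termination_by l => l.length
  decreasing_by
    all_goals
      (try have := List.length_dropWhile_le (fun x => decide ¬x = ' ') r)
      simp_all
      try omega

def fnfFlat (ts : List (List Char)) : List Char := (ts.map (fun t => ' ' :: fnfCap t)).flatten

theorem fnfSplit_go (fuel : Nat) (l cur : List Char) (acc : List (List Char)) (h : l.length < fuel) :
    PySem.Chars.splitOn.go [' '] fuel l cur acc = acc.reverse ++ fnfSplit cur.reverse l := by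
  induction fuel generalizing l cur acc with
  | zero => omega
  | succ fuel ih =>
    cases l with
    | nil => simp [PySem.Chars.splitOn.go, fnfSplit]
    | cons c r =>
      by_cases hc : c = ' '
      · subst hc
        rw [show PySem.Chars.splitOn.go [' '] (fuel+1) (' ' :: r) cur acc
              = PySem.Chars.splitOn.go [' '] fuel r [] (cur.reverse :: acc) by
            simp [PySem.Chars.splitOn.go, List.isPrefixOf]]
        rw [ih r [] (cur.reverse :: acc) (by simpa using Nat.lt_of_succ_lt_succ h)]
        simp [fnfSplit]
      · have hcf : ((' ' : Char) == c) = false := by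
          exact beq_eq_false_iff_ne.mpr fun h => hc h.symm
        rw [show PySem.Chars.splitOn.go [' '] (fuel+1) (c :: r) cur acc
              = PySem.Chars.splitOn.go [' '] fuel r (c :: cur) acc by
            simp [PySem.Chars.splitOn.go, List.isPrefixOf, hcf]]
        rw [ih r (c :: cur) acc (by simpa using Nat.lt_of_succ_lt_succ h)]
        simp [fnfSplit, hc]

theorem splitOn_eq_fnfSplit (l : List Char) :
    PySem.Chars.splitOn l [' '] = fnfSplit [] l := by
  have := fnfSplit_go (l.length + 1) l [] [] (by omega)
  simpa [PySem.Chars.splitOn] using this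

theorem filter_fnfSplit (l : List Char) : ∀ pre,
    (fnfSplit pre l).filter (· ≠ []) =
      if pre = [] then fnfToks l
      else (pre ++ l.takeWhile (· ≠ ' ')) :: fnfToks (l.dropWhile (· ≠ ' ')) := by
  induction l with
  | nil =>
    intro pre
    by_cases hp : pre = [] <;> simp [fnfSplit, fnfToks, hp]
  | cons c r ih =>
    intro pre
    by_cases hc : c = ' '
    · subst hc
      have h0 := ih []
      rw [if_pos rfl] at h0
      by_cases hp : pre = []
      · subst hp
        simpa [fnfSplit, fnfToks, List.filter] using h0
      · have h0' : List.filter (fun x => !decide (x = [])) (fnfSplit [] r) = fnfToks r := by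
          simpa using h0
        simp [fnfSplit, fnfToks, hp, h0']
    · have h1 := ih (pre ++ [c])
      rw [if_neg (by simp)] at h1
      rw [show fnfSplit pre (c :: r) = fnfSplit (pre ++ [c]) r by simp [fnfSplit, hc]]
      rw [h1]
      by_cases hp : pre = [] <;> simp [hp, fnfToks, hc]

theorem join_map_cap (t0 : List Char) (ts : List (List Char)) :
    PySem.Chars.join [' '] ((t0 :: ts).map fnfCap) = fnfCap t0 ++ fnfFlat ts := by
  induction ts generalizing t0 with
  | nil => simp [fnfFlat, PySem.Chars.join_singleton]
  | cons t1 ts ih =>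
    rw [List.map_cons, List.map_cons, PySem.Chars.join_cons_cons]
    have h := ih t1
    rw [List.map_cons] at h
    rw [h]
    simp [fnfFlat]

-- the state machine computes: lowered first token, then ' ' + capitalized word for each later token
theorem fnfLoopA_char (n : Nat) : ∀ (r acc : List Char), r.length ≤ n →
    r.getLast? ≠ some ' ' →
    fnfLoopA acc r = acc ++ PySem.Chars.lower (r.takeWhile (· ≠ ' '))
      ++ fnfFlat (fnfToks (r.dropWhile (· ≠ ' '))) := by
  induction n with
  | zero =>
    intro r acc hn _
    have : r = [] := List.eq_nil_of_length_eq_zero (by omega)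
    subst this
    simp [fnfLoopA, fnfToks, fnfFlat, PySem.Chars.lower]
  | succ n ih =>
    intro r acc hn hlast
    cases r with
    | nil => simp [fnfLoopA, fnfToks, fnfFlat, PySem.Chars.lower]
    | cons c r' =>
      by_cases hc : c = ' '
      · subst hc
        cases r' with
        | nil => simp at hlast
        | cons d r'' =>
          have hlast' : (d :: r'').getLast? ≠ some ' ' := by
            rwa [List.getLast?_cons_cons] at hlast
          by_cases hd : d = ' '
          · subst hd
            rw [show fnfLoopA acc (' ' :: ' ' :: r'') = fnfLoopA acc (' ' :: r'') by
                  rw [fnfLoopA.eq_def]; simp]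
            rw [ih (' ' :: r'') acc (by simp at hn ⊢; omega) hlast']
            simp [fnfToks]
          · rw [show fnfLoopA acc (' ' :: d :: r'')
                  = fnfLoopA (acc ++ [' ', PySem.Chars.upperChar d]) r'' by
                rw [fnfLoopA.eq_def]; simp [hd]]
            have hlast'' : r''.getLast? ≠ some ' ' := by
              cases r'' with
              | nil => simp
              | cons e r''' => rwa [List.getLast?_cons_cons] at hlast'
            rw [ih r'' (acc ++ [' ', PySem.Chars.upperChar d]) (by simp at hn ⊢; omega) hlast'']
            simp [fnfToks, hd, fnfFlat, fnfCap, PySem.Chars.lower]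
      · rw [show fnfLoopA acc (c :: r') = fnfLoopA (acc ++ [PySem.Chars.lowerChar c]) r' by
            rw [fnfLoopA.eq_def]; simp [hc]]
        have hlast' : r'.getLast? ≠ some ' ' := by
          cases r' with
          | nil => simp
          | cons e r'' => rwa [List.getLast?_cons_cons] at hlast
        rw [ih r' (acc ++ [PySem.Chars.lowerChar c]) (by simp at hn; omega) hlast']
        simp [hc, PySem.Chars.lower]

theorem strip_head_not_space {s : List Char} {c : Char} {r : List Char}
    (h : PySem.Chars.strip s = c :: r) : PySem.Chars.isspace c = false := by
  have hpre : PySem.Chars.strip s <+: PySem.Chars.lstrip s := by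
    unfold PySem.Chars.strip PySem.Chars.rstrip
    have hsuf : (PySem.Chars.lstrip s).reverse.dropWhile PySem.Chars.isspace
        <:+ (PySem.Chars.lstrip s).reverse := List.dropWhile_suffix _
    simpa using hsuf.reverse
  obtain ⟨t, ht⟩ := hpre
  have hhead : (PySem.Chars.lstrip s).head? = some c := by
    rw [← ht, h]; simp
  unfold PySem.Chars.lstrip at hhead
  have h2 := List.head?_dropWhile_not PySem.Chars.isspace s
  rw [hhead] at h2
  simpa using h2

theorem strip_getLast?_not_space (s : List Char) :
    (PySem.Chars.strip s).getLast? ≠ some ' ' := by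
  intro h
  rw [List.getLast?_eq_head?_reverse] at h
  unfold PySem.Chars.strip PySem.Chars.rstrip at h
  rw [List.reverse_reverse] at h
  have h2 := List.head?_dropWhile_not PySem.Chars.isspace (PySem.Chars.lstrip s).reverse
  rw [h] at h2
  simp at h2
  exact absurd h2 (by decide)

-- ===== VERDICT (by name: the statement is the Claim_ definition above) =====
theorem Format_Name_Function_spec : Claim_equal_Format_Name_Function := by
  intro name _
  unfold Spec_Format_Name_Function Format_Name_Function Format_Name_Function_alt
  have hhead := fun (c : Char) (r : List Char) (h : PySem.Chars.strip name.toList = c :: r) =>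
    strip_head_not_space h
  have hlastf := strip_getLast?_not_space name.toList
  generalize PySem.Chars.strip name.toList = l at hhead hlastf ⊢
  by_cases hg : l = "AnonymousUser".toList ∨ l.length < 3
  · rw [if_pos hg, if_pos hg]
  · rw [if_neg hg, if_neg hg]
    have hlen : 3 ≤ l.length := by
      rcases Nat.lt_or_ge l.length 3 with h | h
      · exact absurd (Or.inr h) hg
      · exact h
    cases l with
    | nil => simp at hlen
    | cons c r =>
      have hc : c ≠ ' ' := by
        intro hc; subst hc
        have := hhead _ _ rfl
        simp [PySem.Chars.isspace] at this
      have hlastr : r.getLast? ≠ some ' ' := by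
        cases r with
        | nil => simp
        | cons d r' => rwa [List.getLast?_cons_cons] at hlastf
      show String.ofList (fnfLoopA [PySem.Chars.upperChar c] r) = _
      rw [splitOn_eq_fnfSplit,
          show fnfSplit [] (c :: r) = fnfSplit [c] r by simp [fnfSplit, hc]]
      have hfil := filter_fnfSplit r [c]
      rw [if_neg (by simp)] at hfil
      rw [hfil]
      change String.ofList (fnfLoopA [PySem.Chars.upperChar c] r) =
        String.ofList (PySem.Chars.join [' ']
          (List.map fnfCap (([c] ++ List.takeWhile (fun x => decide (x ≠ ' ')) r) ::
            fnfToks (List.dropWhile (fun x => decide (x ≠ ' ')) r))))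
      rw [join_map_cap,
          fnfLoopA_char r.length r [PySem.Chars.upperChar c] le_rfl hlastr]
      simp [fnfCap, PySem.Chars.lower]
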